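-- pv_equiv track=rewrite | github.com/rohioffl/AIREX-AI | services/airex-core/airex_core/investigations/evidence_optimizer.py | optimize_evidence_output
-- ===== SOURCE A (Python) =====
-- _MAX_LINE_LENGTH = 200
--
-- def optimize_evidence_output(raw_output: str, alert_type: str = "") -> str:
--     """
--     Optimize evidence output by:
--     1. Truncating extremely long lines
--     2. Removing redundant sections
--     3. Cleaning up command outputs
--     4. Preserving critical information
--     """
--     if not raw_output:
--         return raw_output
--
--     lines = raw_output.split('\n')
--     optimized_lines: list[str] = []
--     skip_next_empty = False
--
--     for i, line in enumerate(lines):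
--         # Skip redundant empty lines
--         if not line.strip():
--             if skip_next_empty:
--                 continue
--             skip_next_empty = True
--             optimized_lines.append('')
--             continue
--
--         skip_next_empty = False
--
--         # Truncate extremely long lines (likely command outputs or errors)
--         if len(line) > _MAX_LINE_LENGTH:
--             # Preserve the beginning and end of long lines
--             truncated = line[:150] + ' ... [truncated] ... ' + line[-50:]
--             optimized_lines.append(truncated)
--             continue
--
--         # Clean up long bash/python command invocations in process lists
--         # Only process lines that are in process list format (have PID, CPU%, MEM% columns)
--         if len(line) > _MAX_LINE_LENGTH and ('/bin/bash' in line or ('python' in line and '-c' in line)):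
--             # Check if this looks like a process list line (has numbers that could be PID, CPU%, MEM%)
--             parts = line.split()
--             if len(parts) >= 4:
--                 try:
--                     # Try to parse as process list: USER PID %CPU %MEM ...
--                     float(parts[2])  # %CPU should be a number
--                     float(parts[3])  # %MEM should be a number
--                     # This is a process list line - simplify it
--                     if '/bin/bash' in line:
--                         # Keep: USER PID %CPU %MEM VSZ RSS TTY STAT START TIME
--                         # Simplify the command part
--                         cmd_start_idx = 10 if len(parts) > 10 else len(parts)
--                         simplified = ' '.join(parts[:cmd_start_idx])
--                         if len(line) > _MAX_LINE_LENGTH: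
--                             simplified += ' [bash command - truncated]'
--                         optimized_lines.append(simplified)
--                         continue
--                     elif 'python' in line and '-c' in line:
--                         cmd_start_idx = 10 if len(parts) > 10 else len(parts)
--                         simplified = ' '.join(parts[:cmd_start_idx])
--                         if len(line) > _MAX_LINE_LENGTH:
--                             simplified += ' [python script - truncated]'
--                         optimized_lines.append(simplified)
--                         continue
--                 except (ValueError, IndexError):
--                     # Not a process list line, fall through to normal truncation
--                     pass
--
--         optimized_lines.append(line)
--
--     # Remove trailing empty lines
--     while optimized_lines and not optimized_lines[-1].strip():
--         optimized_lines.pop()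
--
--     return '\n'.join(optimized_lines)
-- ===== SOURCE B (Python) =====
-- _MAX_LINE_LENGTH = 200
--
--
-- def optimize_evidence_output(raw_output: str, alert_type: str = "") -> str:
--     """Paragraph-based rebuild: group non-blank (cleaned) lines into paragraphs,
--     join paragraphs with a double newline; blank lines never enter the data,
--     they exist only as join separators (plus a leading newline when the text
--     starts blank but has content)."""
--     if not raw_output:
--         return raw_output
--     lines = raw_output.split('\n')
--     paragraphs = []
--     current = []
--     for line in lines:
--         if line.strip():
--             if len(line) > _MAX_LINE_LENGTH:
--                 line = line[:150] + ' ... [truncated] ... ' + line[-50:]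
--             current.append(line)
--         elif current:
--             paragraphs.append('\n'.join(current))
--             current = []
--     if current:
--         paragraphs.append('\n'.join(current))
--     body = '\n\n'.join(paragraphs)
--     if paragraphs and not lines[0].strip():
--         body = '\n' + body
--     return body
-- ===== Notes on version B (the rewrite author's own statement) =====
-- stated objective: alternative
-- what changed: Instead of A's flag-driven stateful loop that emits blank lines, collapses their runs and pops trailing blanks from a line list, B groups cleaned non-blank lines into paragraphs and rebuilds the text by joining the paragraphs with a double newline (plus one leading newline when the text starts blank): blank lines never appear as data, only as join separators; A's unreachable process-list block (guarded by a len>200 test already consumed above) is dropped.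
import Mathlib
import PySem

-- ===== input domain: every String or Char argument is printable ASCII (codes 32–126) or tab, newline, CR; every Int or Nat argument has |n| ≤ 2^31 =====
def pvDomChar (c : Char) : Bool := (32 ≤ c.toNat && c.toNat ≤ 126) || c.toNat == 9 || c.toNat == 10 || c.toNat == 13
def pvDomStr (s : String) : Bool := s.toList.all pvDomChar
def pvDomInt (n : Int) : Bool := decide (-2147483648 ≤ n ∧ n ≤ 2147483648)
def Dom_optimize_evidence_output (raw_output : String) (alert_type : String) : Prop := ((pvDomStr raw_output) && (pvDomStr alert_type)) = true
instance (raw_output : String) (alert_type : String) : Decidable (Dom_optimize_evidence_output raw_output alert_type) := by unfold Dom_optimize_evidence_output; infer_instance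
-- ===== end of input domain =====

-- B rebuilds the text from paragraphs (groups of cleaned non-blank lines joined with a double newline),
-- so blank lines exist only as join separators, instead of A's flag-driven line-list loop with
-- blank-run collapsing and a trailing pop; A's dead process-list block is dropped. Objective: alternative.

-- `line[:150] + ' ... [truncated] ... ' + line[-50:]` (identical expression in both Pythons)
def pvTruncate (l : List Char) : List Char :=
  PySem.Chars.slice l none (some 150) ++ (" ... [truncated] ... ").toList ++
    PySem.Chars.slice l (some (-50)) none

-- ===== PORT A =====
-- the `for i, line in enumerate(lines)` loop with its `skip_next_empty` flag.
-- A's second long-line block (`if len(line) > _MAX_LINE_LENGTH and ('/bin/bash' in line or …)`)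
-- is unreachable: every line with len > 200 was already consumed (with `continue`) by the
-- truncation branch just above, so it is omitted here as dead code.
def aLoop : List (List Char) → Bool → List (List Char)
  | [], _ => []
  | l :: ls, skip =>
    if PySem.Chars.strip l = [] then
      if skip then aLoop ls skip else [] :: aLoop ls true
    else if 200 < l.length then
      pvTruncate l :: aLoop ls false
    else
      l :: aLoop ls false

-- `while optimized_lines and not optimized_lines[-1].strip(): optimized_lines.pop()`,
-- expressed on the reversed list (pop from the back = drop from the front of the reverse).
def aPopTrailRev : List (List Char) → List (List Char)
  | [] => []
  | x :: xs => if PySem.Chars.strip x = [] then aPopTrailRev xs else x :: xs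

def optimize_evidence_output (raw_output : String) (alert_type : String) : String :=
  if raw_output = "" then raw_output
  else
    String.ofList (PySem.Chars.join ("\n").toList
      ((aPopTrailRev (aLoop (PySem.Chars.splitOn raw_output.toList ("\n").toList) false).reverse).reverse))

-- ===== PORT B =====
-- B's `for line in lines` loop: `paragraphs` holds the joined paragraph strings,
-- `current` the lines of the open paragraph.
def bLoop : List (List Char) → List (List Char) → List (List Char) → List (List Char)
  | [], paras, cur =>
    -- `if current: paragraphs.append('\n'.join(current))`
    if cur = [] then paras else paras ++ [PySem.Chars.join ("\n").toList cur]
  | l :: ls, paras, cur =>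
    if PySem.Chars.strip l ≠ [] then
      bLoop ls paras (cur ++ [if 200 < l.length then pvTruncate l else l])
    else if cur = [] then bLoop ls paras cur
    else bLoop ls (paras ++ [PySem.Chars.join ("\n").toList cur]) []

def optimize_evidence_output_alt (raw_output : String) (alert_type : String) : String :=
  if raw_output = "" then raw_output
  else
    let lines := PySem.Chars.splitOn raw_output.toList ("\n").toList
    let paras := bLoop lines [] []
    let body := PySem.Chars.join ("\n\n").toList paras
    -- `lines[0]`: `lines` is nonempty (split of a nonempty string), so `headI` is exact
    String.ofList (if paras ≠ [] ∧ PySem.Chars.strip lines.headI = [] then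
      ("\n").toList ++ body else body)

-- ===== PRECONDITION & SPEC =====
def Spec_optimize_evidence_output (raw_output : String) (alert_type : String) (out : String) : Prop := out = optimize_evidence_output_alt raw_output alert_type
instance (raw_output : String) (alert_type : String) (out : String) : Decidable (Spec_optimize_evidence_output raw_output alert_type out) := by unfold Spec_optimize_evidence_output; infer_instance

-- ===== CLAIM =====
def Claim_equal_optimize_evidence_output : Prop := ∀ (raw_output : String) (alert_type : String), Dom_optimize_evidence_output raw_output alert_type → Spec_optimize_evidence_output raw_output alert_type (optimize_evidence_output raw_output alert_type)

-- ===== LEMMAS AND PROOFS =====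

-- per-line cleaning (proof-side canonical form; blank ↦ [])
def bClean (l : List Char) : List Char :=
  if PySem.Chars.strip l = [] then []
  else if 200 < l.length then pvTruncate l
  else l

-- blank-run collapsing (canonical form of A's loop on the cleaned lines)
def cCollapse : List (List Char) → List (List Char)
  | [] => []
  | s :: rest =>
    if s = [] then [] :: cCollapse (rest.dropWhile (· = []))
    else s :: cCollapse rest
termination_by l => l.length
decreasing_by
  · simpa using Nat.lt_succ_of_le (List.length_dropWhile_le _ _)
  · simp

-- drop trailing empty lines, directly
def dropT : List (List Char) → List (List Char)
  | [] => []
  | x :: xs => if x = [] ∧ dropT xs = [] then [] else x :: dropT xs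

-- paragraphs: maximal runs of nonempty cleaned lines
def paras : List (List Char) → List (List (List Char))
  | [] => []
  | s :: rest =>
    if s = [] then paras rest
    else (s :: rest.takeWhile (· ≠ [])) :: paras (rest.dropWhile (· ≠ []))
termination_by l => l.length
decreasing_by
  · simp
  · simpa using Nat.lt_succ_of_le (List.length_dropWhile_le _ _)

-- element-wise paragraph builder matching bLoop's traversal
def parasE : List (List Char) → List (List Char) → List (List (List Char))
  | [], cur => if cur = [] then [] else [cur]
  | x :: rest, cur =>
    if x ≠ [] then parasE rest (cur ++ [x])
    else if cur = [] then parasE rest cur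
    else cur :: parasE rest []

-- paragraphs interleaved with single blank lines
def interB : List (List (List Char)) → List (List Char)
  | [] => []
  | [g] => g
  | g :: h :: t => g ++ ([] :: interB (h :: t))

theorem strip_eq_nil_iff (cs : List Char) :
    PySem.Chars.strip cs = [] ↔ ∀ c ∈ cs, PySem.Chars.isspace c := by
  simp only [PySem.Chars.strip, PySem.Chars.rstrip, PySem.Chars.lstrip,
    List.reverse_eq_nil_iff, List.dropWhile_eq_nil_iff, List.mem_reverse]
  constructor
  · intro h c hc
    have hsplit : c ∈ cs.takeWhile PySem.Chars.isspace ++ cs.dropWhile PySem.Chars.isspace := by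
      rw [List.takeWhile_append_dropWhile]; exact hc
    rcases List.mem_append.mp hsplit with h1 | h1
    · exact List.mem_takeWhile_imp h1
    · exact h c h1
  · intro h c hc
    exact h c (List.Sublist.mem hc (List.dropWhile_sublist _))

theorem strip_truncate_ne_nil (l : List Char) : PySem.Chars.strip (pvTruncate l) ≠ [] := by
  intro h
  have hdot : '.' ∈ pvTruncate l := by
    unfold pvTruncate
    refine List.mem_append.mpr (Or.inl (List.mem_append.mpr (Or.inr ?_)))
    decide
  have := (strip_eq_nil_iff _).mp h '.' hdot
  simp [PySem.Chars.isspace] at this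

theorem bClean_ne_nil (l : List Char) (h : PySem.Chars.strip l ≠ []) :
    bClean l ≠ [] ∧ PySem.Chars.strip (bClean l) ≠ [] := by
  unfold bClean
  rw [if_neg h]
  split
  · refine ⟨?_, strip_truncate_ne_nil l⟩
    intro hnil
    exact strip_truncate_ne_nil l (by rw [hnil]; rfl)
  · exact ⟨fun hnil => h (by rw [hnil]; rfl), h⟩

theorem cCollapse_cons_nil (rest : List (List Char)) :
    cCollapse ([] :: rest) = [] :: cCollapse (rest.dropWhile (· = [])) := by
  rw [cCollapse]; simp

theorem cCollapse_cons_ne (s : List Char) (rest : List (List Char)) (h : s ≠ []) :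
    cCollapse (s :: rest) = s :: cCollapse rest := by
  rw [cCollapse]; simp [h]

theorem aLoop_eq_cCollapse (ls : List (List Char)) :
    aLoop ls false = cCollapse (ls.map bClean) ∧
      aLoop ls true = cCollapse ((ls.map bClean).dropWhile (· = [])) := by
  induction ls with
  | nil =>
    have h : cCollapse [] = [] := by rw [cCollapse.eq_def]
    exact ⟨h.symm, h.symm⟩
  | cons l ls ih =>
    obtain ⟨ih1, ih2⟩ := ih
    by_cases hb : PySem.Chars.strip l = []
    · have hcl : bClean l = [] := by unfold bClean; rw [if_pos hb]
      constructor
      · rw [show aLoop (l :: ls) false = [] :: aLoop ls true by simp [aLoop, hb],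
          List.map_cons, hcl, cCollapse_cons_nil, ih2]
      · rw [show aLoop (l :: ls) true = aLoop ls true by simp [aLoop, hb],
          List.map_cons, hcl, List.dropWhile_cons_of_pos (by simp), ih2]
    · have hne : bClean l ≠ [] := (bClean_ne_nil l hb).1
      have hstep : ∀ b, aLoop (l :: ls) b = bClean l :: aLoop ls false := by
        intro b
        simp only [aLoop, bClean, if_neg hb]
        split <;> rfl
      constructor
      · rw [hstep false, List.map_cons, cCollapse_cons_ne _ _ hne, ih1]
      · rw [hstep true, List.map_cons,
          List.dropWhile_cons_of_neg (by simp [hne]), cCollapse_cons_ne _ _ hne, ih1]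

theorem mem_cCollapse (ls : List (List Char)) :
    ∀ x ∈ cCollapse ls, x = [] ∨ x ∈ ls := by
  fun_induction cCollapse ls with
  | case1 => intro x hx; simp at hx
  | case2 rest ih =>
    intro x hx
    rcases List.mem_cons.mp hx with rfl | hx'
    · exact Or.inl rfl
    · rcases ih x hx' with h' | h'
      · exact Or.inl h'
      · exact Or.inr (List.mem_cons_of_mem _ (List.Sublist.mem h' (List.dropWhile_sublist _)))
  | case3 s rest hs ih =>
    intro x hx
    rcases List.mem_cons.mp hx with rfl | hx'
    · exact Or.inr List.mem_cons_self
    · rcases ih x hx' with h' | h'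
      · exact Or.inl h'
      · exact Or.inr (List.mem_cons_of_mem _ h')

theorem dropT_append_single (ys : List (List Char)) (x : List Char) :
    dropT (ys ++ [x]) = if x = [] then dropT ys else ys ++ [x] := by
  induction ys with
  | nil => by_cases hx : x = [] <;> simp [dropT, hx]
  | cons y ys ih =>
    rw [List.cons_append, dropT, ih]
    by_cases hx : x = []
    · rw [if_pos hx, if_pos hx, dropT]
    · simp [hx]

-- A's trailing pop, on lists where blank ↔ empty, is dropT
theorem aPop_eq_dropT (xs : List (List Char))
    (h : ∀ x ∈ xs, PySem.Chars.strip x = [] ↔ x = []) :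
    (aPopTrailRev xs.reverse).reverse = dropT xs := by
  induction xs using List.reverseRecOn with
  | nil => rfl
  | append_singleton ys x ih =>
    have hx : PySem.Chars.strip x = [] ↔ x = [] := h x (by simp)
    have hys : ∀ y ∈ ys, PySem.Chars.strip y = [] ↔ y = [] :=
      fun y hy => h y (by simp [hy])
    rw [dropT_append_single, List.reverse_append, List.reverse_singleton,
      List.singleton_append, aPopTrailRev]
    by_cases hxe : x = []
    · rw [if_pos (hx.mpr hxe), if_pos hxe, ih hys]
    · rw [if_neg (fun c => hxe (hx.mp c)), if_neg hxe, List.reverse_cons,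
        List.reverse_reverse]

-- every paragraph is nonempty
theorem paras_ne_nil (cs : List (List Char)) : ∀ g ∈ paras cs, g ≠ [] := by
  fun_induction paras cs with
  | case1 => intro g hg; simp at hg
  | case2 rest ih => exact ih
  | case3 s rest hs ih =>
    intro g hg
    rcases List.mem_cons.mp hg with rfl | hg'
    · simp
    · exact ih g hg'

theorem paras_dropWhile_nil (cs : List (List Char)) :
    paras (cs.dropWhile (· = [])) = paras cs := by
  induction cs with
  | nil => rfl
  | cons x rest ih =>
    by_cases hx : x = []
    · subst hx
      rw [List.dropWhile_cons_of_pos (by simp), ih, paras]; simp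
    · rw [List.dropWhile_cons_of_neg (by simp [hx])]

theorem interB_cons_cons (a : List Char) (g : List (List Char)) (R : List (List (List Char))) :
    interB ((a :: g) :: R) = a :: interB (g :: R) := by
  cases R with
  | nil => rfl
  | cons h t => rw [interB, interB]; rfl

theorem interB_ne_nil (G : List (List (List Char))) (hne : G ≠ [])
    (h : ∀ g ∈ G, g ≠ []) : interB G ≠ [] := by
  match G with
  | [] => exact absurd rfl hne
  | [g] => simpa [interB] using h g List.mem_cons_self
  | g :: h' :: t =>
    rw [interB]
    simp only [ne_eq, List.append_eq_nil_iff, not_and]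
    exact fun hg _ => h g List.mem_cons_self hg

theorem paras_cons_nil (rest : List (List Char)) :
    paras (([] : List Char) :: rest) = paras rest := by
  rw [paras]; simp

theorem paras_cons_ne (x : List Char) (rest : List (List Char)) (hx : x ≠ []) :
    paras (x :: rest) =
      (x :: rest.takeWhile (· ≠ [])) :: paras (rest.dropWhile (· ≠ [])) := by
  rw [paras]; simp [hx]

theorem head_dropWhile_ne (l : List (List Char)) (y : List Char) (t : List (List Char))
    (h : l.dropWhile (· = []) = y :: t) : y ≠ [] := by
  induction l with
  | nil => simp at h
  | cons a l ih =>
    by_cases ha : a = []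
    · rw [List.dropWhile_cons_of_pos (by simp [ha])] at h; exact ih h
    · rw [List.dropWhile_cons_of_neg (by simp [ha])] at h
      injection h with h1 _
      exact h1 ▸ ha

-- main A-side normal form
theorem dropT_cCollapse (cs : List (List Char)) :
    dropT (cCollapse cs) =
      (if cs.headI = [] ∧ paras cs ≠ [] then [([] : List Char)] else []) ++ interB (paras cs) := by
  have key : ∀ n (cs : List (List Char)), cs.length ≤ n →
      dropT (cCollapse cs) =
        (if cs.headI = [] ∧ paras cs ≠ [] then [([] : List Char)] else []) ++ interB (paras cs) := by
    intro n
    induction n with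
    | zero =>
      intro cs hcs
      have : cs = [] := List.eq_nil_of_length_eq_zero (Nat.le_zero.mp hcs)
      subst this
      rw [cCollapse.eq_def, paras.eq_def]
      simp [dropT, interB]
    | succ n ih =>
      intro cs hcs
      match cs with
      | [] =>
        rw [cCollapse.eq_def, paras.eq_def]
        simp [dropT, interB]
      | x :: rest =>
        by_cases hx : x = []
        · subst hx
          rw [cCollapse_cons_nil, paras_cons_nil]
          have hlen : (rest.dropWhile (· = [])).length ≤ n :=
            le_trans (List.length_dropWhile_le _ _) (Nat.le_of_succ_le_succ hcs)
          have ih' := ih _ hlen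
          rw [paras_dropWhile_nil] at ih'
          by_cases hp : paras rest = []
          · rw [hp] at ih' ⊢
            simp only [interB, List.append_nil, ne_eq, not_true_eq_false, and_false,
              if_false] at ih' ⊢
            rw [dropT, ih']
            simp
          · have hne : interB (paras rest) ≠ [] :=
              interB_ne_nil _ hp (paras_ne_nil rest)
            cases hdw : rest.dropWhile (· = []) with
            | nil =>
              exfalso
              apply hp
              rw [← paras_dropWhile_nil rest, hdw, paras.eq_def]
            | cons y t =>
              have hy : y ≠ [] := head_dropWhile_ne rest y t hdw
              rw [hdw] at ih'
              have hhead : (y :: t).headI = y := rfl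
              rw [hhead, if_neg (by simp [hy]), List.nil_append] at ih'
              rw [dropT, ih']
              rw [if_neg (by simp [hne]), if_pos (by simp [hp])]
              rfl
        · rw [cCollapse_cons_ne _ _ hx, paras_cons_ne _ _ hx]
          have hlen : rest.length ≤ n := Nat.le_of_succ_le_succ hcs
          have ih' := ih rest hlen
          have hIhead : (x :: rest).headI = x := rfl
          rw [hIhead, if_neg (by simp [hx]), List.nil_append]
          match rest with
          | [] =>
            rw [cCollapse.eq_def, paras.eq_def]
            simp [dropT, interB, hx]
          | y :: r =>
            by_cases hy : y = []
            · subst hy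
              have htw : (List.takeWhile (· ≠ []) (([] : List Char) :: r)) = [] := by
                rw [List.takeWhile_cons_of_neg]; simp
              have hdw : (List.dropWhile (· ≠ []) (([] : List Char) :: r)) =
                  ([] : List Char) :: r := by
                rw [List.dropWhile_cons_of_neg]; simp
              rw [htw, hdw]
              by_cases hp : paras (([] : List Char) :: r) = []
              · rw [hp] at ih' ⊢
                simp only [interB, List.append_nil, ne_eq, not_true_eq_false, and_false,
                  if_false] at ih'
                rw [dropT, ih']
                simp [hx, interB]
              · have hh : ((([] : List Char) :: r)).headI = ([] : List Char) := rfl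
                rw [hh, if_pos (by simp [hp])] at ih'
                cases hPQ : paras (([] : List Char) :: r) with
                | nil => exact absurd hPQ hp
                | cons q t =>
                  rw [dropT, ih', if_neg (by simp [hx]), hPQ, interB_cons_cons, interB]
                  rfl
            · have htw : (List.takeWhile (· ≠ []) (y :: r)) = y :: List.takeWhile (· ≠ []) r := by
                rw [List.takeWhile_cons_of_pos]; simp [hy]
              have hdw : (List.dropWhile (· ≠ []) (y :: r)) = List.dropWhile (· ≠ []) r := by
                rw [List.dropWhile_cons_of_pos]; simp [hy]
              rw [htw, hdw]
              rw [paras_cons_ne _ _ hy] at ih'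
              have hh : ((y :: r)).headI = y := rfl
              rw [hh, if_neg (by simp [hy]), List.nil_append] at ih'
              have hne : interB ((y :: List.takeWhile (· ≠ []) r) ::
                  paras (List.dropWhile (· ≠ []) r)) ≠ [] := by
                apply interB_ne_nil _ (by simp)
                intro g hg
                rcases List.mem_cons.mp hg with rfl | hg'
                · simp
                · exact paras_ne_nil _ g hg'
              rw [dropT, ih', if_neg (by simp [hx])]
              simp [interB_cons_cons]
  exact key cs.length cs le_rfl

-- B loop unfolding
theorem bLoop_spec (ls : List (List Char)) (ps cur : List (List Char)) :
    bLoop ls ps cur =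
      ps ++ (parasE (ls.map bClean) cur).map (PySem.Chars.join ("\n").toList) := by
  induction ls generalizing ps cur with
  | nil =>
    rw [bLoop, List.map_nil, parasE]
    by_cases hc : cur = [] <;> simp [hc]
  | cons l ls ih =>
    by_cases hb : PySem.Chars.strip l = []
    · have hcl : bClean l = [] := by unfold bClean; rw [if_pos hb]
      have hstep : bLoop (l :: ls) ps cur =
          if cur = [] then bLoop ls ps cur
          else bLoop ls (ps ++ [PySem.Chars.join ("\n").toList cur]) [] := by
        rw [bLoop, if_neg (by simp [hb])]
      have hpe : parasE (bClean l :: ls.map bClean) cur =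
          if cur = [] then parasE (ls.map bClean) cur
          else cur :: parasE (ls.map bClean) [] := by
        rw [hcl, parasE, if_neg (fun h => h rfl)]
      rw [List.map_cons, hstep, hpe]
      by_cases hc : cur = []
      · rw [if_pos hc, if_pos hc, ih]
      · rw [if_neg hc, if_neg hc, ih, List.map_cons, List.append_assoc,
          List.singleton_append]
    · have hcl : (if 200 < l.length then pvTruncate l else l) = bClean l := by
        unfold bClean; rw [if_neg hb]
      have hne : bClean l ≠ [] := (bClean_ne_nil l hb).1
      have hpe : parasE (bClean l :: ls.map bClean) cur =
          parasE (ls.map bClean) (cur ++ [bClean l]) := by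
        rw [parasE, if_pos (by simp [hne])]
      rw [bLoop, if_pos (by simp [hb]), hcl, ih, List.map_cons, hpe]

theorem parasE_paras (cs : List (List Char)) :
    parasE cs [] = paras cs ∧
      ∀ cur, cur ≠ [] → parasE cs cur =
        (cur ++ cs.takeWhile (· ≠ [])) :: paras (cs.dropWhile (· ≠ [])) := by
  induction cs with
  | nil =>
    constructor
    · rw [parasE, paras.eq_def]; simp
    · intro cur hcur
      rw [parasE, if_neg hcur, paras.eq_def]
      simp
  | cons x rest ih =>
    obtain ⟨ih1, ih2⟩ := ih
    by_cases hx : x = []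
    · subst hx
      constructor
      · rw [parasE, paras_cons_nil]
        simp [ih1]
      · intro cur hcur
        rw [parasE, if_neg (by simp), if_neg hcur, ih1,
          List.takeWhile_cons_of_neg (by simp), List.dropWhile_cons_of_neg (by simp),
          paras_cons_nil, List.append_nil]
    · constructor
      · rw [parasE, if_pos (by simp [hx]), List.nil_append,
          ih2 [x] (by simp), paras_cons_ne _ _ hx]
        rfl
      · intro cur hcur
        rw [parasE, if_pos (by simp [hx]), ih2 (cur ++ [x]) (by simp),
          List.takeWhile_cons_of_pos (by simp [hx]),
          List.dropWhile_cons_of_pos (by simp [hx])]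
        simp

theorem join_append_cons (g : List (List Char)) (y : List Char) (t : List (List Char))
    (hg : g ≠ []) :
    PySem.Chars.join ("\n").toList (g ++ y :: t) =
      PySem.Chars.join ("\n").toList g ++ ("\n").toList ++ PySem.Chars.join ("\n").toList (y :: t) := by
  induction g with
  | nil => exact absurd rfl hg
  | cons a g' ih =>
    cases g' with
    | nil =>
      rw [List.singleton_append, PySem.Chars.join_cons_cons, PySem.Chars.join_singleton]
    | cons b g'' =>
      rw [List.cons_append, List.cons_append, PySem.Chars.join_cons_cons,
        PySem.Chars.join_cons_cons, ← List.cons_append, ih (by simp)]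
      simp [List.append_assoc]

theorem join_interB (G : List (List (List Char))) (h : ∀ g ∈ G, g ≠ []) :
    PySem.Chars.join ("\n").toList (interB G) =
      PySem.Chars.join ("\n\n").toList (G.map (PySem.Chars.join ("\n").toList)) := by
  induction G with
  | nil => rfl
  | cons g G' ih =>
    cases G' with
    | nil => rw [interB]; simp
    | cons h' t =>
      have hG' : ∀ g' ∈ h' :: t, g' ≠ [] := fun g' hg' => h g' (List.mem_cons_of_mem _ hg')
      have hne : interB (h' :: t) ≠ [] :=
        interB_ne_nil _ (by simp) hG'
      have hsep : ("\n").toList ++ ("\n").toList = ("\n\n").toList := by decide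
      rw [interB, join_append_cons _ _ _ (h g List.mem_cons_self)]
      cases hI : interB (h' :: t) with
      | nil => exact absurd hI hne
      | cons z zs =>
        rw [PySem.Chars.join_cons_cons, ← hI, ih hG']
        simp only [List.map_cons]
        rw [PySem.Chars.join_cons_cons]
        simp only [List.nil_append, List.append_assoc]
        rw [← List.append_assoc (("\n").toList) (("\n").toList), hsep]

-- ===== VERDICT =====
theorem optimize_evidence_output_spec : Claim_equal_optimize_evidence_output := by
  intro raw_output alert_type _
  unfold Spec_optimize_evidence_output optimize_evidence_output optimize_evidence_output_alt
  by_cases h0 : raw_output = ""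
  · rw [if_pos h0, if_pos h0]
  · rw [if_neg h0, if_neg h0]
    dsimp only
    generalize PySem.Chars.splitOn raw_output.toList ("\n").toList = lines
    have hpred : ∀ x ∈ cCollapse (lines.map bClean), PySem.Chars.strip x = [] ↔ x = [] := by
      intro x hx
      rcases mem_cCollapse _ x hx with rfl | hx'
      · simp [PySem.Chars.strip, PySem.Chars.lstrip, PySem.Chars.rstrip]
      · obtain ⟨l, _, rfl⟩ := List.mem_map.mp hx'
        by_cases hb : PySem.Chars.strip l = []
        · have hbc : bClean l = [] := by unfold bClean; rw [if_pos hb]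
          rw [hbc]
          simp [PySem.Chars.strip, PySem.Chars.lstrip, PySem.Chars.rstrip]
        · obtain ⟨h1, h2⟩ := bClean_ne_nil l hb
          exact ⟨fun c => absurd c h2, fun c => absurd c h1⟩
    rw [(aLoop_eq_cCollapse lines).1, aPop_eq_dropT _ hpred, dropT_cCollapse,
      bLoop_spec, (parasE_paras (lines.map bClean)).1, List.nil_append]
    have hhead : (lines.map bClean).headI = [] ↔ PySem.Chars.strip lines.headI = [] := by
      cases lines with
      | nil => decide
      | cons l0 ls =>
        show bClean l0 = [] ↔ PySem.Chars.strip l0 = []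
        constructor
        · intro hc
          by_contra hb
          exact (bClean_ne_nil l0 hb).1 hc
        · intro hb
          unfold bClean; rw [if_pos hb]
    have hJ := join_interB _ (paras_ne_nil (lines.map bClean))
    by_cases hp : paras (lines.map bClean) = []
    · rw [hp] at hJ ⊢
      rw [if_neg (by simp), if_neg (by simp), List.nil_append, hJ]
    · by_cases hh : (lines.map bClean).headI = []
      · rw [if_pos ⟨hh, hp⟩, if_pos ⟨by simp [hp], hhead.mp hh⟩]
        have hne : interB (paras (lines.map bClean)) ≠ [] :=
          interB_ne_nil _ hp (paras_ne_nil (lines.map bClean))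
        cases hI : interB (paras (lines.map bClean)) with
        | nil => exact absurd hI hne
        | cons z zs =>
          rw [List.singleton_append, PySem.Chars.join_cons_cons, ← hI, hJ,
            List.nil_append]
      · rw [if_neg (by simp [hh]), if_neg (fun c => hh (hhead.mpr c.2)),
          List.nil_append, hJ]
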